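-- pv_equiv track=rewrite | github.com/kasrakazemi/Wang-mendel-model | class Scheduling/code.py | createNestedList
-- ===== SOURCE A (Python) =====
-- def createNestedList(listt):
--     out_list=[]
--     movaghat=[]
--     for  i in range(len(listt)):
--         movaghat.append(listt[i])
--         if len(movaghat)==2:
--             out_list.append(movaghat)
--             movaghat=[]
--     return out_list
-- ===== SOURCE B (Python) =====
-- def createNestedList(listt):
--     it = iter(listt)
--     return [[a, b] for a, b in zip(it, it)]
-- ===== Notes on version B (the rewrite author's own statement) =====
-- stated objective: idiomatic
-- what changed: B replaces the index loop with accumulate-and-flush buffer by the standard iterator-pairing idiom zip(it, it), consuming two elements per step with no buffer state.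
import Mathlib
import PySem

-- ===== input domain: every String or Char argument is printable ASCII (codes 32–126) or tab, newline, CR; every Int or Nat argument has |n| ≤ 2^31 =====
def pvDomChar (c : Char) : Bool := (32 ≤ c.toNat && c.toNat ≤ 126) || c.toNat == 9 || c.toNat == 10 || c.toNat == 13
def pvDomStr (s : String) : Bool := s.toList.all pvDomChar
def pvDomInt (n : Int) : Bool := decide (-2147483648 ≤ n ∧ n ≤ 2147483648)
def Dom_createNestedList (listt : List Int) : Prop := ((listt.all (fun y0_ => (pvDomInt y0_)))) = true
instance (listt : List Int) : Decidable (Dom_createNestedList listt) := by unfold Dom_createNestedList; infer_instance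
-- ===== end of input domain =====

-- B replaces the index loop with an accumulate-and-flush buffer by iterator pairing (zip(it, it)), consuming two elements per step.

-- ===== PORT A =====
-- index loop over range(len(listt)); state = (out_list, movaghat)
def createNestedList (listt : List Int) : List (List Int) :=
  let st :=
    (PySem.List.pyRange 0 (listt.length : Int) 1).foldl
      (fun (s : List (List Int) × List Int) i =>
        let movaghat := s.2 ++ [PySem.List.pyGetD listt i 0]
        if movaghat.length = 2 then (s.1 ++ [movaghat], []) else (s.1, movaghat))
      ([], [])
  st.1

-- ===== PORT B =====
-- zip(it, it): take two elements per step
def createNestedList_alt (listt : List Int) : List (List Int) :=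
  match listt with
  | a :: b :: rest => [a, b] :: createNestedList_alt rest
  | _ => []

-- ===== PRECONDITION & SPEC =====
def Spec_createNestedList (listt : List Int) (out : List (List Int)) : Prop := out = createNestedList_alt listt
instance (listt : List Int) (out : List (List Int)) : Decidable (Spec_createNestedList listt out) := by unfold Spec_createNestedList; infer_instance

-- ===== CLAIM (what is proved, stated in full; the proofs are below) =====
def Claim_equal_createNestedList : Prop := ∀ (listt : List Int), Dom_createNestedList listt → Spec_createNestedList listt (createNestedList listt)

-- ===== LEMMAS AND PROOFS =====

-- A's loop step, after foldl_pyRange_pyGetD turns the index loop into a fold over the list itself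
def pvStepA (s : List (List Int) × List Int) (x : Int) : List (List Int) × List Int :=
  let movaghat := s.2 ++ [x]
  if movaghat.length = 2 then (s.1 ++ [movaghat], []) else (s.1, movaghat)

-- invariant of A's fold started with an empty buffer
theorem pvFoldA_eq (xs : List Int) : ∀ out : List (List Int),
    (xs.foldl pvStepA (out, [])).1 = out ++ createNestedList_alt xs := by
  induction xs using createNestedList_alt.induct with
  | case1 a b rest ih =>
      intro out
      simp [List.foldl, pvStepA, createNestedList_alt, ih (out ++ [[a, b]])]
  | case2 xs h =>
      intro out
      cases xs with
      | nil => simp [createNestedList_alt]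
      | cons a t =>
        cases t with
        | nil => simp [List.foldl, pvStepA, createNestedList_alt]
        | cons b r => exact absurd rfl (h a b r)

-- ===== VERDICT (by name: the statement is the Claim_ definition above) =====
theorem createNestedList_spec : Claim_equal_createNestedList := by
  intro listt _
  show createNestedList listt = createNestedList_alt listt
  show (List.foldl (fun s i => pvStepA s (PySem.List.pyGetD listt i 0)) ([], [])
          (PySem.List.pyRange 0 (listt.length : Int) 1)).1 = createNestedList_alt listt
  rw [PySem.List.foldl_pyRange_pyGetD' (xs := listt) (f := pvStepA) (d := 0)
        (init := (([], []) : List (List Int) × List Int)) (a := 0) (le_refl 0)]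
  simpa using pvFoldA_eq listt []
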